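-- pv_equiv track=rewrite | github.com/diofeher/algorithms | order-buckets.py | dp
-- ===== SOURCE A (Python) =====
-- def dp(inp):
--     lst = list(inp)
--
--     N = len(lst)
--     B = lst.count("B")
--
--     # 2 - Return invalid if there is no available space to order the buckets -> O(1)
--     if B * 2 - 1 > N:
--         return -1
--
--     best_value = B
--     # O(N) outer loop - O(B) inner loop
--     for i in range(N):
--         # The maximum size of moves to put in order is the same number of buckets available
--         cur_value = B
--         # Current sliding window
--         for j in range(B):
--             cur_pos = i + j * 2
--             if cur_pos > N - 1:
--                 break
--             # Count how many B are in the right position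
--             # A sliding window starts with a B then it's followed by a dot .
--             # Index access is O(1)
--             if lst[cur_pos] == "B":
--                 cur_value -= 1
--         best_value = min(best_value, cur_value)
--
--     return best_value
-- ===== SOURCE B (Python) =====
-- def dp(inp):
--     lst = list(inp)
--     N = len(lst)
--     B = lst.count("B")
--     if B * 2 - 1 > N:
--         return -1
--     # suf[i] = number of "B" at indices i, i+2, i+4, ... (same parity as i); built right to left
--     rev = [0, 0]
--     for c in reversed(lst):
--         rev.append(rev[-2] + (c == "B"))
--     suf = rev[::-1]
--     # hits for start i = suf[i] - suf[i + 2*B]: B's among positions i, i+2, ..., i+2*(B-1)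
--     best = 0
--     for i in range(N):
--         j = i + 2 * B
--         tail = suf[j] if j < len(suf) else 0
--         best = max(best, suf[i] - tail)
--     return B - best
-- ===== Notes on version B (the rewrite author's own statement) =====
-- stated objective: alternative
-- what changed: Replaces A's nested scan (for every start index, re-walk up to B window positions) by a precomputed parity-stepped suffix-count array suf[i] = #B at i, i+2, ..., so each start index's window count is the single difference suf[i] - suf[i+2B].
import Mathlib
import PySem

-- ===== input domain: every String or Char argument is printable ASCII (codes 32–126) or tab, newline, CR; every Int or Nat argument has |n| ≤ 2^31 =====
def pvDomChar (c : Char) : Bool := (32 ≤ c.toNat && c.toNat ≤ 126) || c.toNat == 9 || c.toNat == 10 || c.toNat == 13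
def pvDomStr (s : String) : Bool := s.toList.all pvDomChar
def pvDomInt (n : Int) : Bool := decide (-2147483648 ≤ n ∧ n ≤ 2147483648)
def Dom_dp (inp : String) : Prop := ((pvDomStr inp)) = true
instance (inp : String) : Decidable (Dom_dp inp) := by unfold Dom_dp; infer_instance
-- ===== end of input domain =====

-- B replaces A's nested window scan (re-counting each window) by a parity-stepped
-- suffix-count array (suf[i] = #'B' at i, i+2, …) read once per start index (objective: alternative).

-- ===== PORT A =====
-- inner 'for j in range(B): … break …' loop of A: b = remaining iterations, j = loop index
def dpInner (lst : List Char) (N i : Int) : Nat → Int → Int → Int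
  | 0, _, cur => cur
  | b + 1, j, cur =>
      let pos := i + j * 2
      if pos > N - 1 then cur
      else dpInner lst N i b (j + 1)
        (if PySem.List.pyGet? lst pos = some 'B' then cur - 1 else cur)

def dp (inp : String) : Int :=
  let lst := inp.toList
  let N : Int := (lst.length : Int)
  let B : Int := (PySem.List.count lst 'B' : Int)
  if B * 2 - 1 > N then -1
  else (PySem.List.pyRange 0 N 1).foldl
        (fun best i => min best (dpInner lst N i B.toNat 0 B)) B

-- ===== PORT B =====
def dp_alt (inp : String) : Int :=
  let lst := inp.toList
  let N : Int := (lst.length : Int)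
  let B : Int := (PySem.List.count lst 'B' : Int)
  if B * 2 - 1 > N then -1
  else
    -- Python builds 'rev' by appending over reversed(lst) and then reverses it into suf;
    -- here the list is kept newest-element-first, so append = cons, rev[-2] = getD 1, and
    -- the loop result IS suf (the final rev[::-1]) directly.
    let suf : List Int :=
      lst.reverse.foldl
        (fun rev c => (rev.getD 1 0 + (if c = 'B' then 1 else 0)) :: rev) [0, 0]
    let best : Int := (PySem.List.pyRange 0 N 1).foldl
      (fun best i =>
        let j := i + 2 * B
        let tail := if j < (suf.length : Int) then PySem.List.pyGetD suf j 0 else 0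
        max best (PySem.List.pyGetD suf i 0 - tail)) 0
    B - best

-- ===== PRECONDITION & SPEC =====
def Spec_dp (inp : String) (out : Int) : Prop := out = dp_alt inp
instance (inp : String) (out : Int) : Decidable (Spec_dp inp out) := by unfold Spec_dp; infer_instance

-- ===== CLAIM (what is proved, stated in full; the proofs are below) =====
def Claim_equal_dp : Prop := ∀ (inp : String), Dom_dp inp → Spec_dp inp (dp inp)

-- ===== LEMMAS AND PROOFS =====

-- number of 'B' at indices p, p+2, p+4, … of lst
def hitsAll (lst : List Char) (p : Nat) : Int :=
  if h : p < lst.length then (if lst[p] = 'B' then 1 else 0) + hitsAll lst (p + 2) else 0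
termination_by lst.length - p

-- fueled, Int-indexed window count: #'B' among the first b in-range positions p, p+2, …
def hitsI (lst : List Char) : Int → Nat → Int
  | _, 0 => 0
  | p, b + 1 =>
      if p > (lst.length : Int) - 1 then 0
      else (if PySem.List.pyGet? lst p = some 'B' then 1 else 0) + hitsI lst (p + 2) b

theorem hitsAll_zero (lst : List Char) (p : Nat) (h : lst.length ≤ p) : hitsAll lst p = 0 := by
  unfold hitsAll; rw [dif_neg (by omega)]

theorem hitsAll_cons (c : Char) (rest : List Char) (p : Nat) :
    hitsAll (c :: rest) (p + 1) = hitsAll rest p := by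
  by_cases h : p < rest.length
  · have l2 : hitsAll rest p = (if rest[p] = 'B' then 1 else 0) + hitsAll rest (p + 2) := by
      rw [hitsAll, dif_pos h]
    rw [l2, hitsAll, dif_pos (show p + 1 < (c :: rest).length by simp; omega)]
    simp only [List.getElem_cons_succ]
    rw [show p + 1 + 2 = (p + 2) + 1 from rfl, hitsAll_cons c rest (p + 2)]
    rfl
  · rw [hitsAll_zero _ _ (by simpa using h), hitsAll_zero _ _ (by omega)]
termination_by rest.length - p

theorem dpInner_eq (lst : List Char) (i : Int) :
    ∀ (b : Nat) (j cur : Int),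
      dpInner lst (lst.length : Int) i b j cur = cur - hitsI lst (i + j * 2) b := by
  intro b
  induction b with
  | zero => intro j cur; simp [dpInner, hitsI]
  | succ b ih =>
      intro j cur
      rw [dpInner, hitsI]
      by_cases h : i + j * 2 > (lst.length : Int) - 1
      · simp only [h, if_pos]; omega
      · simp only [h, if_false, ih]
        have : i + (j + 1) * 2 = i + j * 2 + 2 := by ring
        rw [this]
        split_ifs <;> omega

theorem hitsI_eq (lst : List Char) :
    ∀ (b : Nat) (p : Nat),
      hitsI lst (p : Int) b = hitsAll lst p - hitsAll lst (p + 2 * b) := by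
  intro b
  induction b with
  | zero => intro p; simp [hitsI]
  | succ b ih =>
      intro p
      rw [hitsI]
      by_cases h : p < lst.length
      · rw [if_neg (by omega)]
        have hget : PySem.List.pyGet? lst (p : Int) = some lst[p] := by simp [pysem, h]
        have hc : ((p : Int) + 2) = ((p + 2 : Nat) : Int) := by push_cast; ring
        rw [hget, hc, ih (p + 2)]
        have hunf : hitsAll lst p = (if lst[p] = 'B' then 1 else 0) + hitsAll lst (p + 2) := by
          rw [hitsAll, dif_pos h]
        have harg : p + 2 + 2 * b = p + 2 * (b + 1) := by omega
        rw [harg] at *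
        simp only [Option.some.injEq]
        split_ifs at hunf ⊢ <;> omega
      · rw [if_pos (by omega)]
        rw [hitsAll_zero _ _ (by omega), hitsAll_zero _ _ (by omega)]
        omega

-- the suffix-count list B builds (foldl over the reversed list = foldr)
def sufOf (lst : List Char) : List Int :=
  lst.foldr (fun c acc => (acc.getD 1 0 + (if c = 'B' then 1 else 0)) :: acc) [0, 0]

theorem sufOf_length (lst : List Char) : (sufOf lst).length = lst.length + 2 := by
  induction lst with
  | nil => rfl
  | cons c rest ih =>
      have h : sufOf (c :: rest)
          = ((sufOf rest).getD 1 0 + (if c = 'B' then 1 else 0)) :: sufOf rest := rfl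
      rw [h, List.length_cons, ih, List.length_cons]

theorem sufOf_getD (lst : List Char) : ∀ (k : Nat), (sufOf lst).getD k 0 = hitsAll lst k := by
  induction lst with
  | nil =>
      intro k
      rw [hitsAll_zero _ _ (by exact Nat.zero_le _)]
      match k with
      | 0 => rfl
      | 1 => rfl
      | k + 2 => rfl
  | cons c rest ih =>
      intro k
      match k with
      | 0 =>
          have hr : hitsAll (c :: rest) 0 = (if c = 'B' then 1 else 0) + hitsAll (c :: rest) 2 := by
            rw [hitsAll, dif_pos (show 0 < (c :: rest).length from Nat.succ_pos _)]
            rfl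
          show (sufOf rest).getD 1 0 + (if c = 'B' then 1 else 0) = hitsAll (c :: rest) 0
          rw [hr, show (2 : Nat) = 1 + 1 from rfl, hitsAll_cons, ih 1]
          ring
      | k + 1 =>
          show (sufOf rest).getD k 0 = _
          rw [ih k, hitsAll_cons]

theorem fold_min_max (B : Int) (g : Int → Int) :
    ∀ (l : List Int) (acc : Int),
      l.foldl (fun b i => min b (B - g i)) (B - acc) = B - l.foldl (fun b i => max b (g i)) acc := by
  intro l
  induction l with
  | nil => intro acc; rfl
  | cons x t ih =>
      intro acc
      simp only [List.foldl_cons]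
      rw [show min (B - acc) (B - g x) = B - max acc (g x) by omega, ih]

-- ===== VERDICT (by name: the statement is the Claim_ definition above) =====
theorem dp_spec : Claim_equal_dp := by
  intro inp _
  unfold Spec_dp dp dp_alt
  simp only []
  set lst := inp.toList with hlst
  set N : Int := (lst.length : Int) with hN
  set B : Int := (PySem.List.count lst 'B' : Int) with hB
  by_cases hc : B * 2 - 1 > N
  · rw [if_pos hc, if_pos hc]
  · rw [if_neg hc, if_neg hc]
    have hB0 : 0 ≤ B := by rw [hB]; positivity
    have hsuf : lst.reverse.foldl
        (fun rev c => (rev.getD 1 0 + (if c = 'B' then 1 else 0)) :: rev) [0, 0] = sufOf lst := by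
      rw [List.foldl_reverse]; rfl
    rw [hsuf]
    -- the common per-start window count
    set g : Int → Int := fun i => hitsAll lst i.toNat - hitsAll lst (i.toNat + 2 * B.toNat) with hg
    have hA : (PySem.List.pyRange 0 N 1).foldl
        (fun best i => min best (dpInner lst N i B.toNat 0 B)) B
        = (PySem.List.pyRange 0 N 1).foldl (fun best i => min best (B - g i)) B := by
      apply PySem.List.foldl_congr_mem
      intro acc i hi
      have hi0 : 0 ≤ i := ((PySem.List.mem_pyRange_one).1 hi).1
      rw [hN, dpInner_eq]
      have : i + 0 * 2 = ((i.toNat : Nat) : Int) := by omega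
      rw [this, hitsI_eq, hg]
    have hBside : (PySem.List.pyRange 0 N 1).foldl
        (fun best i =>
          let j := i + 2 * B
          let tail := if j < ((sufOf lst).length : Int) then PySem.List.pyGetD (sufOf lst) j 0 else 0
          max best (PySem.List.pyGetD (sufOf lst) i 0 - tail)) 0
        = (PySem.List.pyRange 0 N 1).foldl (fun best i => max best (g i)) 0 := by
      apply PySem.List.foldl_congr_mem
      intro acc i hi
      obtain ⟨hi0, hiN⟩ := (PySem.List.mem_pyRange_one).1 hi
      simp only []
      have hlen : ((sufOf lst).length : Int) = N + 2 := by rw [sufOf_length]; push_cast; rw [hN]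
      have hgi : PySem.List.pyGetD (sufOf lst) i 0 = hitsAll lst i.toNat := by
        rw [← sufOf_getD lst i.toNat, ← PySem.List.pyGetD_natCast (sufOf lst) i.toNat 0]
        congr 1
        omega
      have htail : (if i + 2 * B < ((sufOf lst).length : Int)
            then PySem.List.pyGetD (sufOf lst) (i + 2 * B) 0 else 0)
          = hitsAll lst (i.toNat + 2 * B.toNat) := by
        by_cases hj : i + 2 * B < ((sufOf lst).length : Int)
        · rw [if_pos hj, ← sufOf_getD lst (i.toNat + 2 * B.toNat),
            ← PySem.List.pyGetD_natCast (sufOf lst) (i.toNat + 2 * B.toNat) 0]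
          congr 1
          omega
        · rw [if_neg hj, hitsAll_zero]
          rw [hlen] at hj
          omega
      rw [hgi, htail, hg]
    have hfold := fold_min_max B g (PySem.List.pyRange 0 N 1) 0
    rw [sub_zero] at hfold
    rw [hA, hBside, hfold]
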